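-- pv_equiv track=rewrite | github.com/hebbihebb/MBook | fast_maya_engine.py | _unpack_snac
-- ===== SOURCE A (Python) =====
-- CODE_END_TOKEN_ID = 128258
--
-- CODE_TOKEN_OFFSET = 128266
--
-- SNAC_TOKENS_PER_FRAME = 7
--
-- def _unpack_snac(snac_tokens: list) -> list:
--     """Unpack 7-token SNAC frames to 3 hierarchical levels."""
--     if snac_tokens and snac_tokens[-1] == CODE_END_TOKEN_ID:
--         snac_tokens = snac_tokens[:-1]
--
--     frames = len(snac_tokens) // SNAC_TOKENS_PER_FRAME
--     snac_tokens = snac_tokens[:frames * SNAC_TOKENS_PER_FRAME]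
--
--     if frames == 0:
--         return [[], [], []]
--
--     l1, l2, l3 = [], [], []
--
--     for i in range(frames):
--         slots = snac_tokens[i*7:(i+1)*7]
--         l1.append((slots[0] - CODE_TOKEN_OFFSET) % 4096)
--         l2.extend([
--             (slots[1] - CODE_TOKEN_OFFSET) % 4096,
--             (slots[4] - CODE_TOKEN_OFFSET) % 4096,
--         ])
--         l3.extend([
--             (slots[2] - CODE_TOKEN_OFFSET) % 4096,
--             (slots[3] - CODE_TOKEN_OFFSET) % 4096,
--             (slots[5] - CODE_TOKEN_OFFSET) % 4096,
--             (slots[6] - CODE_TOKEN_OFFSET) % 4096,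
--         ])
--
--     return [l1, l2, l3]
-- ===== SOURCE B (Python) =====
-- CODE_END_TOKEN_ID = 128258
--
-- CODE_TOKEN_OFFSET = 128266
--
-- SNAC_TOKENS_PER_FRAME = 7
--
-- def _unpack_snac(snac_tokens: list) -> list:
--     """Unpack 7-token SNAC frames to 3 hierarchical levels (strided, column-wise)."""
--     if snac_tokens and snac_tokens[-1] == CODE_END_TOKEN_ID:
--         snac_tokens = snac_tokens[:-1]
--     frames = len(snac_tokens) // SNAC_TOKENS_PER_FRAME
--     norm = [(t - CODE_TOKEN_OFFSET) % 4096 for t in snac_tokens[:frames * SNAC_TOKENS_PER_FRAME]]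
--     l1 = norm[0::7]
--     l2 = [x for p in zip(norm[1::7], norm[4::7]) for x in p]
--     l3 = [x for q in zip(norm[2::7], norm[3::7], norm[5::7], norm[6::7]) for x in q]
--     return [l1, l2, l3]
-- ===== Notes on version B (the rewrite author's own statement) =====
-- stated objective: alternative
-- what changed: B replaces A's per-frame loop with index-slice bookkeeping by a single normalization pass over all tokens followed by column-wise strided extraction (norm[k::7]) zipped back into the three levels.
import Mathlib
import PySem

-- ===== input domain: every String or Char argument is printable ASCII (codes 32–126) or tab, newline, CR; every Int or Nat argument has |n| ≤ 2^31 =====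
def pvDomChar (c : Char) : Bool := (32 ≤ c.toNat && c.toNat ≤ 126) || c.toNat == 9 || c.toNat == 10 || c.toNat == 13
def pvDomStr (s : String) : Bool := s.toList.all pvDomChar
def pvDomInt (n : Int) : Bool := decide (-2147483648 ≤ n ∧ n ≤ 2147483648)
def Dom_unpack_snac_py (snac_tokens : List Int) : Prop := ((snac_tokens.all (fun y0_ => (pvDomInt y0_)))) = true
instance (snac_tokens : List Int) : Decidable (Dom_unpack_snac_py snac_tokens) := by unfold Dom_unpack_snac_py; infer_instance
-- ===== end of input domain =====

-- B unpacks the SNAC frames column-wise (one normalization pass, then strided extraction) instead of A's per-frame loop; objective: alternative decomposition, same cost.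

-- ===== PORT A =====
-- slots[j] is always in range (slots has length 7), so pyGetD with default 0 is exact here.
def unpack_snac_py (snac_tokens : List Int) : List (List Int) :=
  let t0 := if snac_tokens ≠ [] ∧ PySem.List.pyGetD snac_tokens (-1) 0 = 128258
            then PySem.List.slice snac_tokens none (some (-1)) else snac_tokens
  let frames := PySem.Int.floordiv (t0.length : Int) 7
  let t := PySem.List.slice t0 none (some (frames * 7))
  if frames = 0 then [[], [], []]
  else
    let st := (PySem.List.pyRange 0 frames 1).foldl
      (fun (acc : List Int × List Int × List Int) i =>
        let slots := PySem.List.slice t (some (i * 7)) (some ((i + 1) * 7))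
        let g := fun (j : Int) => PySem.Int.mod (PySem.List.pyGetD slots j 0 - 128266) 4096
        (acc.1 ++ [g 0], acc.2.1 ++ [g 1, g 4], acc.2.2 ++ [g 2, g 3, g 5, g 6]))
      ([], [], [])
    [st.1, st.2.1, st.2.2]

-- ===== PORT B =====
-- every7 xs is the strided slice xs[0::7]; norm[k::7] is ported as every7 (norm.drop k) — exact for nonnegative start k and step 7.
def every7 (xs : List Int) : List Int :=
  match xs with
  | [] => []
  | y :: rest => y :: every7 (rest.drop 6)
termination_by xs.length
decreasing_by simp

def unpack_snac_py_alt (snac_tokens : List Int) : List (List Int) :=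
  let t0 := if snac_tokens ≠ [] ∧ PySem.List.pyGetD snac_tokens (-1) 0 = 128258
            then PySem.List.slice snac_tokens none (some (-1)) else snac_tokens
  let frames := PySem.Int.floordiv (t0.length : Int) 7
  let norm := (PySem.List.slice t0 none (some (frames * 7))).map
    (fun t => PySem.Int.mod (t - 128266) 4096)
  let l1 := every7 norm
  let l2 := ((every7 (norm.drop 1)).zip (every7 (norm.drop 4))).flatMap
    (fun p => [p.1, p.2])
  let l3 := (((every7 (norm.drop 2)).zip (every7 (norm.drop 3))).zip
             ((every7 (norm.drop 5)).zip (every7 (norm.drop 6)))).flatMap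
    (fun q => [q.1.1, q.1.2, q.2.1, q.2.2])
  [l1, l2, l3]

-- ===== PRECONDITION & SPEC =====
def Spec_unpack_snac_py (snac_tokens : List Int) (out : List (List Int)) : Prop := out = unpack_snac_py_alt snac_tokens
instance (snac_tokens : List Int) (out : List (List Int)) : Decidable (Spec_unpack_snac_py snac_tokens out) := by unfold Spec_unpack_snac_py; infer_instance

-- ===== CLAIM (what is proved, stated in full; the proofs are below) =====
def Claim_equal_unpack_snac_py : Prop := ∀ (snac_tokens : List Int), Dom_unpack_snac_py snac_tokens → Spec_unpack_snac_py snac_tokens (unpack_snac_py snac_tokens)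


-- ===== LEMMAS AND PROOFS =====
-- normalization applied to every token
def pvG (x : Int) : Int := PySem.Int.mod (x - 128266) 4096

-- B's l2 / l3 columns, as functions of the normalized list (proof-side abbreviations)
def pvL2 (n : List Int) : List Int :=
  ((every7 (n.drop 1)).zip (every7 (n.drop 4))).flatMap (fun p => [p.1, p.2])
def pvL3 (n : List Int) : List Int :=
  (((every7 (n.drop 2)).zip (every7 (n.drop 3))).zip
   ((every7 (n.drop 5)).zip (every7 (n.drop 6)))).flatMap
    (fun q => [q.1.1, q.1.2, q.2.1, q.2.2])

lemma pv_slice_shift7 (x0 x1 x2 x3 x4 x5 x6 : Int) (r : List Int) (j : Nat) :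
    PySem.List.slice (x0::x1::x2::x3::x4::x5::x6::r) (some (((j:Int)+1) * 7)) (some ((((j:Int)+1) + 1) * 7))
      = PySem.List.slice r (some ((j:Int) * 7)) (some (((j:Int) + 1) * 7)) := by
  rw [PySem.List.slice_toNat _ (by positivity) (by positivity),
      PySem.List.slice_toNat _ (by positivity) (by positivity)]
  have h1 : (((j:Int)+1) * 7).toNat = 7*j + 7 := by omega
  have h2 : ((((j:Int)+1) + 1) * 7).toNat = 7*j + 14 := by omega
  have h3 : ((j:Int) * 7).toNat = 7*j := by omega
  rw [h1, h2, h3]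
  have hd : List.drop (7*j + 7) (x0::x1::x2::x3::x4::x5::x6::r) = List.drop (7*j) r := by
    rw [show 7*j + 7 = 7 + 7*j by omega, ← List.drop_drop]
    simp
  rw [hd]
  congr 1
  omega

-- A's per-frame loop, characterized column-wise (B's decomposition)
lemma pv_loopA (k : Nat) (t : List Int) (h : t.length = 7 * k) (a b c : List Int) :
    (List.range k).foldl
      (fun (acc : List Int × List Int × List Int) (j : Nat) =>
        let slots := PySem.List.slice t (some ((j:Int) * 7)) (some (((j:Int) + 1) * 7))
        let gg := fun (i : Int) => PySem.Int.mod (PySem.List.pyGetD slots i 0 - 128266) 4096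
        (acc.1 ++ [gg 0], acc.2.1 ++ [gg 1, gg 4], acc.2.2 ++ [gg 2, gg 3, gg 5, gg 6]))
      (a, b, c)
    = (a ++ every7 (t.map pvG), b ++ pvL2 (t.map pvG), c ++ pvL3 (t.map pvG)) := by
  induction k generalizing t a b c with
  | zero =>
    have ht : t = [] := List.eq_nil_of_length_eq_zero (by omega)
    subst ht
    simp [every7, pvL2, pvL3]
  | succ k ih =>
    rcases t with _ | ⟨x0, t⟩; · simp at h
    rcases t with _ | ⟨x1, t⟩; · simp at h; omega
    rcases t with _ | ⟨x2, t⟩; · simp at h; omega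
    rcases t with _ | ⟨x3, t⟩; · simp at h; omega
    rcases t with _ | ⟨x4, t⟩; · simp at h; omega
    rcases t with _ | ⟨x5, t⟩; · simp at h; omega
    rcases t with _ | ⟨x6, t⟩; · simp at h; omega
    have hr : t.length = 7 * k := by simp at h; omega
    rw [List.range_succ_eq_map, List.foldl_cons, List.foldl_map]
    have hstep :
        (fun (acc : List Int × List Int × List Int) (j : Nat) =>
          let slots := PySem.List.slice (x0::x1::x2::x3::x4::x5::x6::t)
              (some (((j.succ:Nat):Int) * 7)) (some ((((j.succ:Nat):Int) + 1) * 7))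
          let gg := fun (i : Int) => PySem.Int.mod (PySem.List.pyGetD slots i 0 - 128266) 4096
          (acc.1 ++ [gg 0], acc.2.1 ++ [gg 1, gg 4], acc.2.2 ++ [gg 2, gg 3, gg 5, gg 6]))
        = (fun (acc : List Int × List Int × List Int) (j : Nat) =>
          let slots := PySem.List.slice t (some ((j:Int) * 7)) (some (((j:Int) + 1) * 7))
          let gg := fun (i : Int) => PySem.Int.mod (PySem.List.pyGetD slots i 0 - 128266) 4096
          (acc.1 ++ [gg 0], acc.2.1 ++ [gg 1, gg 4], acc.2.2 ++ [gg 2, gg 3, gg 5, gg 6])) := by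
      funext acc j
      have : ((j.succ : Nat) : Int) = (j : Int) + 1 := by push_cast; ring
      rw [this, pv_slice_shift7]
    rw [hstep]
    have hfirst : PySem.List.slice (x0::x1::x2::x3::x4::x5::x6::t)
        (some (((0:Nat):Int) * 7)) (some ((((0:Nat):Int) + 1) * 7)) = [x0,x1,x2,x3,x4,x5,x6] := by
      rw [PySem.List.slice_toNat _ (by norm_num) (by norm_num)]
      rw [show ((((0:Nat):Int) + 1) * 7).toNat - (((0:Nat):Int) * 7).toNat = 7 by omega,
          show (((0:Nat):Int) * 7).toNat = 0 by omega]
      simp [List.take_succ_cons]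
    rw [hfirst, ih _ hr]
    simp only [List.map_cons, every7, pvL2, pvL3, List.drop_succ_cons, List.drop_zero,
      List.zip_cons_cons, List.flatMap_cons]
    simp [PySem.List.pyGetD, PySem.List.pyGet?, PySem.List.pyIdx?, pvG]

-- ===== VERDICT (by name: the statement is the Claim_ definition above) =====
theorem unpack_snac_py_spec : Claim_equal_unpack_snac_py := by
  intro snac_tokens _
  unfold Spec_unpack_snac_py unpack_snac_py unpack_snac_py_alt
  dsimp only
  set t0 := if snac_tokens ≠ [] ∧ PySem.List.pyGetD snac_tokens (-1) 0 = 128258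
            then PySem.List.slice snac_tokens none (some (-1)) else snac_tokens with ht0
  set frames := PySem.Int.floordiv (t0.length : Int) 7 with hfr
  have hdecomp := PySem.Int.floordiv_mul_add_mod (t0.length : Int) 7
  have hm0 := PySem.Int.mod_nonneg (t0.length : Int) (by norm_num : (0:Int) < 7)
  have hm7 := PySem.Int.mod_lt (t0.length : Int) (by norm_num : (0:Int) < 7)
  have hfnn : 0 ≤ frames := by rw [hfr]; omega
  by_cases hz : frames = 0
  · rw [if_pos hz, hz]
    rw [show ((0:Int) * 7) = 0 by ring, PySem.List.slice_to _ (le_refl 0)]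
    simp [every7]
  · rw [if_neg hz]
    have hk : frames = ((frames.toNat : Nat) : Int) := (Int.toNat_of_nonneg hfnn).symm
    set k := frames.toNat with hkdef
    rw [hk]
    have hlen : (PySem.List.slice t0 none (some ((k:Int) * 7))).length = 7 * k := by
      rw [PySem.List.slice_to _ (by positivity)]
      rw [List.length_take]
      omega
    rw [PySem.List.pyRange_zero_natCast, List.foldl_map]
    have hmain := pv_loopA k (PySem.List.slice t0 none (some ((k:Int) * 7))) hlen [] [] []
    simp only [List.nil_append] at hmain
    rw [show (fun t => PySem.Int.mod (t - 128266) 4096) = pvG from rfl, hmain]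
    simp only [pvL2, pvL3]
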